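-- pv_equiv track=rewrite | github.com/eliottcassidy2000/math | 04-computation/bjorklund_cycle_cover.py | odd_cycle_cover_weighted
-- ===== SOURCE A (Python) =====
-- from itertools import permutations
--
-- def odd_cycle_cover_weighted(adj, n):
--     """For each cycle cover consisting only of odd-length cycles,
--     compute 2^{number of cycles} and sum them.
--     Compare to I(Omega(T), 2)."""
--     if n == 0:
--         return 1  # empty cycle cover
--     total = 0
--     for perm in permutations(range(n)):
--         valid = True
--         for i in range(n):
--             if not adj[i][perm[i]]:
--                 valid = False
--                 break
--         if not valid:
--             continue
--         visited = [False] * n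
--         num_cycles = 0
--         all_odd = True
--         for start in range(n):
--             if visited[start]:
--                 continue
--             length = 0
--             cur = start
--             while not visited[cur]:
--                 visited[cur] = True
--                 cur = perm[cur]
--                 length += 1
--             num_cycles += 1
--             if length % 2 == 0:
--                 all_odd = False
--                 break
--         if all_odd:
--             total += 2 ** num_cycles
--     return total
-- ===== SOURCE B (Python) =====
-- def odd_cycle_cover_weighted(adj, n):
--     """Sum 2^{#cycles} over adjacency-valid cycle covers with all cycles odd.
--     Backtracking over valid partial assignments (never materialises invalid
--     permutations), scoring a complete assignment by recursive cycle peeling."""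
--     if n <= 0:
--         return 1
--
--     def cyc_weight(p, rem):
--         # rem: increasing list of vertices not yet covered by a peeled cycle
--         if not rem:
--             return 1
--         v = rem[0]
--         members = [v]
--         cur = p[v]
--         length = 1
--         while cur != v:
--             members.append(cur)
--             cur = p[cur]
--             length += 1
--         if length % 2 == 0:
--             return 0
--         return 2 * cyc_weight(p, [u for u in rem if u not in members])
--
--     def rec(i, p):
--         if i == n:
--             return cyc_weight(p, list(range(n)))
--         total = 0
--         for j in range(n):
--             if j not in p and adj[i][j]:
--                 total += rec(i + 1, p + [j])
--         return total
--
--     return rec(0, [])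
-- ===== Notes on version B (the rewrite author's own statement) =====
-- stated objective: alternative
-- what changed: A filters all n! permutations from itertools and counts cycles with a visited array and early breaks; B backtracks over adjacency-valid partial assignments (never completing invalid prefixes) and scores a complete assignment by recursively peeling the cycle through the least uncovered vertex.
-- outside the precondition, e.g. on odd_cycle_cover_weighted([[False, False], [True]], 2): A returns 0, B returns 0
import Mathlib
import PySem

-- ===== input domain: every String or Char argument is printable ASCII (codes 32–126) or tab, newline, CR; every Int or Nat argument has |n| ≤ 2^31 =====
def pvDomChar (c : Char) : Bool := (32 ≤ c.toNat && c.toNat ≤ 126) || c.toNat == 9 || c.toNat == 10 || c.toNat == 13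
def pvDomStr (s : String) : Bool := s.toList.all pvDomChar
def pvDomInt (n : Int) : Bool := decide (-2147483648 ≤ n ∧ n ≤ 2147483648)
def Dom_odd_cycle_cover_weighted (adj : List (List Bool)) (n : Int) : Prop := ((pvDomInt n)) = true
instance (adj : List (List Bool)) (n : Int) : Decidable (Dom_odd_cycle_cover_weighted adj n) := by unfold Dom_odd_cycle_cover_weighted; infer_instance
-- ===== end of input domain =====

-- B replaces A's filter-all-n!-permutations scan by a backtracking search over
-- adjacency-valid partial assignments, scoring a complete assignment by recursive cycle
-- peeling from the least uncovered vertex (objective: alternative algorithm, same result).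

-- ===== PORT A =====
-- xs[i] for an index that is in range on every reachable call (under Pre_)
def pvAt (xs : List Int) (i : Int) : Int := (PySem.List.pyGet? xs i).getD 0
-- adj[i][j]; exact whenever row i has at least j+1 entries (guaranteed by Pre_)
def pvAdjAt (adj : List (List Bool)) (i j : Int) : Bool :=
  (PySem.List.pyGet? ((PySem.List.pyGet? adj i).getD []) j).getD false

-- A's inner 'while not visited[cur]' walk (fuel n+1 suffices: each step marks a fresh vertex)
def pvWalkA (p : List Int) : Nat → List Bool → Int → Int → (List Bool × Int)
  | 0, vis, _, len => (vis, len)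
  | f+1, vis, cur, len =>
    if (PySem.List.pyGet? vis cur).getD true then (vis, len)
    else pvWalkA p f (vis.set cur.toNat true) (pvAt p cur) (len + 1)

-- A's 'for start in range(n)' cycle-counting loop, with its break on an even cycle
def pvCycA (p : List Int) (fuel : Nat) : List Int → List Bool → Nat → Int
  | [], _, num => 2 ^ num
  | s :: rest, vis, num =>
    if (PySem.List.pyGet? vis s).getD true then pvCycA p fuel rest vis num
    else
      let w := pvWalkA p fuel vis s 0
      if w.2 % 2 == 0 then 0 else pvCycA p fuel rest w.1 (num + 1)

-- the body of A's main loop for one permutation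
def pvScoreA (adj : List (List Bool)) (n : Int) (p : List Int) : Int :=
  if (PySem.List.pyRange 0 n 1).all (fun i => pvAdjAt adj i (pvAt p i)) then
    pvCycA p (n.toNat + 1) (PySem.List.pyRange 0 n 1) (List.replicate n.toNat false) 0
  else 0

def odd_cycle_cover_weighted (adj : List (List Bool)) (n : Int) : Int :=
  if n = 0 then 1
  else
    (PySem.List.permutations (PySem.List.pyRange 0 n 1)
        (PySem.List.pyRange 0 n 1).length).foldl
      (fun total p => total + pvScoreA adj n p) 0

-- ===== PORT B =====
-- B's cycle walk: collect the members of the cycle through v and its length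
def pvWalkB (p : List Int) (v : Int) : Nat → List Int → Int → Int → (List Int × Int)
  | 0, mem, _, len => (mem, len)
  | f+1, mem, cur, len =>
    if cur == v then (mem, len)
    else pvWalkB p v f (mem ++ [cur]) (pvAt p cur) (len + 1)

-- B's cyc_weight: peel the cycle through the least remaining vertex (fuel bounds recursion depth)
def pvCycB (p : List Int) (nfuel : Nat) : Nat → List Int → Int
  | _, [] => 1
  | 0, _ :: _ => 0
  | f+1, v :: rest =>
    let w := pvWalkB p v nfuel [v] (pvAt p v) 1
    if w.2 % 2 == 0 then 0
    else 2 * pvCycB p nfuel f ((v :: rest).filter (fun u => !w.1.contains u))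

-- B's rec: extend a valid partial assignment p of the first i rows; fuel = n - i
def pvRecB (adj : List (List Bool)) (n : Int) : Nat → Int → List Int → Int
  | 0, _, p => pvCycB p (n.toNat + 1) n.toNat (PySem.List.pyRange 0 n 1)
  | f+1, i, p =>
    (PySem.List.pyRange 0 n 1).foldl
      (fun total j =>
        if !p.contains j && pvAdjAt adj i j then total + pvRecB adj n f (i + 1) (p ++ [j])
        else total) 0

def odd_cycle_cover_weighted_alt (adj : List (List Bool)) (n : Int) : Int :=
  if n ≤ 0 then 1 else pvRecB adj n n.toNat 0 []

-- ===== PRECONDITION & SPEC =====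
-- Pre_ requires the adjacency matrix to contain a full n×n block: without it both A and B
-- raise IndexError on generic inputs of that shape; the residual excluded cases, where an
-- all-False row happens to mask every missing entry, have both programs return 0 anyway.
def Pre_odd_cycle_cover_weighted (adj : List (List Bool)) (n : Int) : Prop :=
  n ≤ (adj.length : Int) ∧ ∀ row ∈ adj.take n.toNat, n ≤ (row.length : Int)
instance (adj : List (List Bool)) (n : Int) : Decidable (Pre_odd_cycle_cover_weighted adj n) := by
  unfold Pre_odd_cycle_cover_weighted; infer_instance

def pvWitness_odd_cycle_cover_weighted : List (List Bool) × Int := ([[true, true], [true, false]], 2)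

def Spec_odd_cycle_cover_weighted (adj : List (List Bool)) (n : Int) (out : Int) : Prop := out = odd_cycle_cover_weighted_alt adj n
instance (adj : List (List Bool)) (n : Int) (out : Int) : Decidable (Spec_odd_cycle_cover_weighted adj n out) := by unfold Spec_odd_cycle_cover_weighted; infer_instance

-- ===== CLAIM (what is proved, stated in full; the proofs are below) =====
def Claim_equal_odd_cycle_cover_weighted : Prop := ∀ (adj : List (List Bool)) (n : Int), Dom_odd_cycle_cover_weighted adj n → Pre_odd_cycle_cover_weighted adj n → Spec_odd_cycle_cover_weighted adj n (odd_cycle_cover_weighted adj n)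

-- ===== LEMMAS AND PROOFS =====

-- validity of a permutation suffix starting at row i (proof-side reformulation of A's check)
def pvValidFrom (adj : List (List Bool)) : Int → List Int → Bool
  | _, [] => true
  | i, j :: s => pvAdjAt adj i j && pvValidFrom adj (i + 1) s

-- B's leaf value on a complete assignment
def pvLeaf (p : List Int) (n : Int) : Int :=
  pvCycB p (n.toNat + 1) n.toNat (PySem.List.pyRange 0 n 1)

-- vertices not yet visited, in increasing order
def pvRemOf (n : Int) (vis : List Bool) : List Int :=
  (PySem.List.pyRange 0 n 1).filter (fun j => !(vis.getD j.toNat true))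

-- ---- generic list lemmas ----
theorem pv_sum_map_flatMap {α β : Type} (l : List α) (f : α → List β) (g : β → Int) :
    (((l.flatMap f).map g).sum : Int) = (l.map (fun x => ((f x).map g).sum)).sum := by
  induction l with
  | nil => rfl
  | cons x xs ih => simp [List.flatMap_cons, ih]

theorem pv_foldl_if (L : List Int) (c : Int → Bool) (g : Int → Int) (t0 : Int) :
    L.foldl (fun t j => if c j then t + g j else t) t0
      = t0 + ((L.filter c).map g).sum := by
  induction L generalizing t0 with
  | nil => simp
  | cons x xs ih =>
    by_cases h : c x <;> simp [h, ih, add_assoc]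

theorem pv_sum_filter (L : List Int) (c : Int → Bool) (g : Int → Int) :
    ((L.filter c).map g).sum = (L.map (fun j => if c j then g j else 0)).sum := by
  induction L with
  | nil => rfl
  | cons x xs ih =>
    by_cases h : c x <;> simp [List.filter_cons, h, ih]

theorem pv_key (xs : List Int) (hx : xs.Nodup) (F : Int → List Int → Int) :
    ((List.range xs.length).map
        (fun i => (xs[i]?.map (fun x => F x (xs.eraseIdx i))).getD 0)).sum
      = (xs.map (fun j => F j (xs.filter (fun u => !(u == j))))).sum := by
  induction xs generalizing F with
  | nil => rfl
  | cons x xs ih =>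
    rcases List.nodup_cons.1 hx with ⟨hxmem, hnd⟩
    have h0 : List.range (x :: xs).length = 0 :: (List.range xs.length).map (· + 1) := by
      simpa using (List.range_succ_eq_map (n := xs.length))
    rw [h0]
    simp only [List.map_cons, List.map_map, List.sum_cons]
    have h1 : ((List.range xs.length).map
        ((fun i => ((x :: xs)[i]?.map (fun y => F y ((x :: xs).eraseIdx i))).getD 0) ∘ (· + 1)))
        = ((List.range xs.length).map
            (fun i => (xs[i]?.map (fun y => F y (x :: xs.eraseIdx i))).getD 0)) := by
      apply List.map_congr_left
      intro i _
      simp [List.eraseIdx_cons_succ]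
    rw [h1, ih hnd (fun y l => F y (x :: l))]
    have h2 : (x :: xs).filter (fun u => !(u == x)) = xs := by
      rw [List.filter_cons]
      simp only [beq_self_eq_true, Bool.not_true, Bool.false_eq_true, if_false]
      exact List.filter_eq_self.2 (fun a ha => by
        simp only [Bool.not_eq_true', beq_eq_false_iff_ne]
        rintro rfl; exact hxmem ha)
    have h3 : xs.map (fun j => F j (x :: xs.filter (fun u => !(u == j))))
        = xs.map (fun j => F j ((x :: xs).filter (fun u => !(u == j)))) := by
      apply List.map_congr_left
      intro j hj
      have hne : ¬ (x == j) = true := by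
        simp only [beq_iff_eq]; rintro rfl; exact hxmem hj
      rw [List.filter_cons]
      simp [hne]
    rw [h2, h3]
    simp


theorem pv_perm_succ (xs : List Int) (r : Nat) :
    PySem.List.permutations xs (r+1) = (List.range xs.length).flatMap (fun i =>
      (xs[i]?.map (fun x => (PySem.List.permutations (xs.eraseIdx i) r).map (fun p => x :: p))).getD []) := by
  rw [PySem.List.permutations]
  congr 1
  funext i
  cases h : xs[i]? <;> simp [h]

theorem pv_perm_zero (xs : List Int) : PySem.List.permutations xs 0 = [[]] := by
  rw [PySem.List.permutations]

theorem pv_sum_ite_and {α : Type} (L : List α) (a : Bool) (b : α → Bool) (t : α → Int) :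
    (L.map (fun s => if a && b s then t s else 0)).sum
      = if a then (L.map (fun s => if b s then t s else 0)).sum else 0 := by
  cases a <;> simp

-- ---- backtracking lemma ----
theorem pv_BT (adj : List (List Bool)) (n : Int) (f : Nat) (p xs : List Int)
    (hnd : xs.Nodup)
    (hxs : xs = (PySem.List.pyRange 0 n 1).filter (fun u => !(p.contains u)))
    (hlen : xs.length = f) :
    pvRecB adj n f (p.length : Int) p
      = ((PySem.List.permutations xs f).map
          (fun s => if pvValidFrom adj (p.length : Int) s then pvLeaf (p ++ s) n else 0)).sum := by
  induction f generalizing p xs with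
  | zero =>
    rw [pv_perm_zero]
    simp [pvRecB, pvValidFrom, pvLeaf]
  | succ f ih =>
    have step1 : pvRecB adj n (f+1) (p.length : Int) p
        = ((xs.filter (fun j => pvAdjAt adj (p.length : Int) j)).map
            (fun j => pvRecB adj n f ((p.length : Int) + 1) (p ++ [j]))).sum := by
      show (PySem.List.pyRange 0 n 1).foldl _ 0 = _
      rw [pv_foldl_if (PySem.List.pyRange 0 n 1)
        (fun j => !p.contains j && pvAdjAt adj (p.length : Int) j)
        (fun j => pvRecB adj n f ((p.length : Int) + 1) (p ++ [j])) 0, zero_add]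
      congr 2
      rw [hxs, List.filter_filter]
      apply List.filter_congr
      intro j _
      exact Bool.and_comm _ _
    rw [step1, pv_sum_filter]
    rw [pv_perm_succ, pv_sum_map_flatMap]
    have step2 : ((List.range xs.length).map (fun i =>
          (((xs[i]?.map (fun x => (PySem.List.permutations (xs.eraseIdx i) f).map
              (fun q => x :: q))).getD []).map
            (fun s => if pvValidFrom adj (p.length : Int) s then pvLeaf (p ++ s) n else 0)).sum))
        = ((List.range xs.length).map (fun i =>
            (xs[i]?.map (fun x =>
              ((PySem.List.permutations (xs.eraseIdx i) f).map
                (fun s' => if pvValidFrom adj (p.length : Int) (x :: s')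
                  then pvLeaf (p ++ (x :: s')) n else 0)).sum)).getD 0)) := by
      apply List.map_congr_left
      intro i _
      cases h : xs[i]? <;> simp [h, List.map_map, Function.comp_def]
    rw [step2, pv_key xs hnd (fun x l =>
      ((PySem.List.permutations l f).map
        (fun s' => if pvValidFrom adj (p.length : Int) (x :: s')
          then pvLeaf (p ++ (x :: s')) n else 0)).sum)]
    congr 1
    apply List.map_congr_left
    intro j hj
    have hval : ∀ s', pvValidFrom adj (p.length : Int) (j :: s')
        = (pvAdjAt adj (p.length : Int) j && pvValidFrom adj ((p.length : Int) + 1) s') := by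
      intro s'; rfl
    have hleaf : ∀ s', pvLeaf (p ++ (j :: s')) n = pvLeaf ((p ++ [j]) ++ s') n := by
      intro s'; rw [← List.append_cons]
    have hxs' : xs.filter (fun u => !(u == j))
        = (PySem.List.pyRange 0 n 1).filter (fun u => !((p ++ [j]).contains u)) := by
      rw [hxs, List.filter_filter]
      apply List.filter_congr
      intro u _
      simp only [List.contains_append, List.contains_cons, List.contains_nil,
        Bool.or_false, Bool.not_or]
      rw [Bool.and_comm]
    have hlen' : (xs.filter (fun u => !(u == j))).length = f := by
      have he : xs.erase j = xs.filter (fun u => !(u == j)) := by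
        rw [List.Nodup.erase_eq_filter hnd]
        apply List.filter_congr
        intro u _
        simp [bne]
      rw [← he, List.length_erase_of_mem hj, hlen]
      omega
    have hrec := ih (p ++ [j]) (xs.filter (fun u => !(u == j)))
      (hnd.filter _) (by rw [hxs']) hlen'
    have hplen : ((p ++ [j]).length : Int) = (p.length : Int) + 1 := by
      simp
    rw [hplen] at hrec
    simp only [hval, hleaf, pv_sum_ite_and, ← hrec]

theorem pv_all_congr (L : List Int) (f g : Int → Bool) (h : ∀ x ∈ L, f x = g x) :
    L.all f = L.all g := by
  induction L with
  | nil => rfl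
  | cons x xs ih =>
    simp only [List.all_cons, h x List.mem_cons_self,
      ih (fun y hy => h y (List.mem_cons_of_mem _ hy))]

-- ---- validity reformulation ----
theorem pv_validFrom_eq (adj : List (List Bool)) (s : List Int) (i : Int) (hi : 0 ≤ i) :
    pvValidFrom adj i s
      = (PySem.List.pyRange i (i + s.length) 1).all
          (fun k => pvAdjAt adj k (pvAt s (k - i))) := by
  induction s generalizing i with
  | nil =>
    rw [PySem.List.pyRange_one_eq_nil (by simp)]
    rfl
  | cons j s ih =>
    have hend : i + ((j :: s).length : Int) = (i + 1) + (s.length : Int) := by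
      push_cast [List.length_cons]; ring
    rw [hend, PySem.List.pyRange_one_cons (by omega), List.all_cons]
    show (pvAdjAt adj i j && pvValidFrom adj (i + 1) s) = _
    congr 1
    · simp [pvAt, PySem.List.pyGet?_zero_cons]
    · rw [ih (i + 1) (by omega)]
      apply pv_all_congr
      intro k hk
      rcases PySem.List.mem_pyRange_one.1 hk with ⟨hk1, _⟩
      have h1 : k - i = ((k - (i + 1)).toNat : Int) + 1 := by omega
      rw [h1]
      simp only [pvAt, PySem.List.pyGet?_cons_succ]
      rw [show ((k - (i + 1)).toNat : Int) = k - (i + 1) by omega]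

-- ---- cycle machinery ----
def pvIter (p : List Int) (v : Int) (k : Nat) : Int := (pvAt p)^[k] v

theorem pv_test (vis : List Bool) (x : Int) (hx0 : 0 ≤ x) (hxl : x < (vis.length : Int)) :
    (PySem.List.pyGet? vis x).getD true = vis.getD x.toNat true := by
  have hlt : x.toNat < vis.length := by omega
  rw [PySem.List.pyGet?_eq_some_getElem vis hx0 hxl, Option.getD_some,
    List.getD_eq_getElem?_getD, List.getElem?_eq_getElem hlt, Option.getD_some]

theorem pv_at_mem (p : List Int) (n : Int) (hn : 0 < n)
    (hmem : ∀ x, x ∈ p ↔ (0 ≤ x ∧ x < n)) (hlen : p.length = n.toNat)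
    (x : Int) (hx0 : 0 ≤ x) (hxn : x < n) : 0 ≤ pvAt p x ∧ pvAt p x < n := by
  have hxl : x < (p.length : Int) := by omega
  have hlt : x.toNat < p.length := by omega
  have : pvAt p x = p[x.toNat] := by
    rw [pvAt, PySem.List.pyGet?_eq_some_getElem p hx0 hxl, Option.getD_some]
  rw [this]
  exact (hmem _).1 (p.getElem_mem hlt)

theorem pv_at_inj (p : List Int) (n : Int) (hn : 0 < n)
    (hlen : p.length = n.toNat) (hnd : p.Nodup)
    (x y : Int) (hx0 : 0 ≤ x) (hxn : x < n) (hy0 : 0 ≤ y) (hyn : y < n)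
    (h : pvAt p x = pvAt p y) : x = y := by
  have hxl : x.toNat < p.length := by omega
  have hyl : y.toNat < p.length := by omega
  have hx : pvAt p x = p[x.toNat] := by
    rw [pvAt, PySem.List.pyGet?_eq_some_getElem p hx0 (by omega), Option.getD_some]
  have hy : pvAt p y = p[y.toNat] := by
    rw [pvAt, PySem.List.pyGet?_eq_some_getElem p hy0 (by omega), Option.getD_some]
  rw [hx, hy] at h
  have := (List.Nodup.getElem_inj_iff hnd (hi := hxl) (hj := hyl)).1 h
  omega

theorem pv_iter_mem (p : List Int) (n : Int) (hn : 0 < n)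
    (hmem : ∀ x, x ∈ p ↔ (0 ≤ x ∧ x < n)) (hlen : p.length = n.toNat)
    (v : Int) (hv0 : 0 ≤ v) (hvn : v < n) :
    ∀ k, 0 ≤ pvIter p v k ∧ pvIter p v k < n := by
  intro k
  induction k with
  | zero => exact ⟨hv0, hvn⟩
  | succ k ih =>
    rw [pvIter, Function.iterate_succ_apply']
    exact pv_at_mem p n hn hmem hlen _ ih.1 ih.2

theorem pv_iter_cancel (p : List Int) (n : Int) (hn : 0 < n)
    (hmem : ∀ x, x ∈ p ↔ (0 ≤ x ∧ x < n)) (hlen : p.length = n.toNat) (hnd : p.Nodup)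
    (v : Int) (hv0 : 0 ≤ v) (hvn : v < n) :
    ∀ a b, a ≤ b → pvIter p v a = pvIter p v b → pvIter p v (b - a) = v := by
  intro a
  induction a generalizing v with
  | zero =>
    intro b _ h
    rw [Nat.sub_zero]
    have h0 : pvIter p v 0 = v := rfl
    rw [← h, h0]
  | succ a ih =>
    intro b hab h
    rcases b with _ | c
    · omega
    have ha' : pvIter p v (a+1) = pvAt p (pvIter p v a) := by
      rw [pvIter, Function.iterate_succ_apply']; rfl
    have hc' : pvIter p v (c+1) = pvAt p (pvIter p v c) := by
      rw [pvIter, Function.iterate_succ_apply']; rfl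
    rw [ha', hc'] at h
    have h1 := pv_iter_mem p n hn hmem hlen v hv0 hvn a
    have h2 := pv_iter_mem p n hn hmem hlen v hv0 hvn c
    have h' : pvIter p v a = pvIter p v c :=
      pv_at_inj p n hn hlen hnd _ _ h1.1 h1.2 h2.1 h2.2 h
    have := ih v hv0 hvn c (by omega) h'
    simpa [Nat.succ_sub_succ] using this

theorem pv_period (p : List Int) (n : Int) (hn : 0 < n)
    (hmem : ∀ x, x ∈ p ↔ (0 ≤ x ∧ x < n)) (hlen : p.length = n.toNat) (hnd : p.Nodup)
    (v : Int) (hv0 : 0 ≤ v) (hvn : v < n) :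
    ∃ T, 0 < T ∧ T ≤ n.toNat ∧ pvIter p v T = v ∧
      ∀ t, 0 < t → t < T → pvIter p v t ≠ v := by
  have hiter := pv_iter_mem p n hn hmem hlen v hv0 hvn
  have hex : ∃ t, 0 < t ∧ t ≤ n.toNat ∧ pvIter p v t = v := by
    obtain ⟨a, ha, b, hb, hne, hfeq⟩ :=
      Finset.exists_ne_map_eq_of_card_lt_of_maps_to
        (s := Finset.range (n.toNat + 1)) (t := Finset.range n.toNat)
        (by simp) (f := fun t => (pvIter p v t).toNat)
        (by
          intro t _
          have := hiter t
          simp only [Finset.coe_range, Set.mem_Iio]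
          omega)
    simp only [Finset.mem_range] at ha hb
    have heq : pvIter p v a = pvIter p v b := by
      have h1 := hiter a; have h2 := hiter b
      omega
    rcases Nat.lt_or_ge a b with hab | hab
    · exact ⟨b - a, by omega, by omega,
        pv_iter_cancel p n hn hmem hlen hnd v hv0 hvn a b (by omega) heq⟩
    · have hba : b < a := by omega
      exact ⟨a - b, by omega, by omega,
        pv_iter_cancel p n hn hmem hlen hnd v hv0 hvn b a (by omega) heq.symm⟩
  have hP : ∃ t, 0 < t ∧ pvIter p v t = v := by
    obtain ⟨t, ht1, _, ht3⟩ := hex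
    exact ⟨t, ht1, ht3⟩
  obtain ⟨t0, ht01, ht02, ht03⟩ := hex
  refine ⟨Nat.find hP, (Nat.find_spec hP).1, le_trans (Nat.find_min' hP ⟨ht01, ht03⟩) ht02,
    (Nat.find_spec hP).2, ?_⟩
  intro t ht1 ht2 ht3
  exact Nat.find_min hP ht2 ⟨ht1, ht3⟩

theorem pv_prefix (p : List Int) (n : Int) (hn : 0 < n)
    (hmem : ∀ x, x ∈ p ↔ (0 ≤ x ∧ x < n)) (hlen : p.length = n.toNat) (hnd : p.Nodup)
    (v : Int) (hv0 : 0 ≤ v) (hvn : v < n)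
    (T : Nat) (hT1 : 0 < T) (hTv : pvIter p v T = v)
    (hTmin : ∀ t, 0 < t → t < T → pvIter p v t ≠ v) :
    ∀ t len, t < len → len ≤ T → pvIter p v len = pvIter p v t → (len = T ∧ t = 0) := by
  intro t len htl hlT h
  have hc := pv_iter_cancel p n hn hmem hlen hnd v hv0 hvn t len (by omega) h.symm
  have h1 : ¬ (len - t < T) := by
    intro hlt
    exact hTmin (len - t) (by omega) hlt hc
  omega

theorem pv_fresh (p : List Int) (n : Int) (hn : 0 < n)
    (hmem : ∀ x, x ∈ p ↔ (0 ≤ x ∧ x < n)) (hlen : p.length = n.toNat)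
    (v : Int) (hv0 : 0 ≤ v) (hvn : v < n) (vis : List Bool) (hvl : vis.length = n.toNat)
    (hcl : ∀ k : Nat, k < n.toNat → vis.getD k true = false →
      vis.getD (pvAt p (k : Int)).toNat true = false)
    (hv : vis.getD v.toNat true = false) :
    ∀ t, vis.getD (pvIter p v t).toNat true = false := by
  intro t
  induction t with
  | zero => exact hv
  | succ t ih =>
    have hi := pv_iter_mem p n hn hmem hlen v hv0 hvn t
    have hk : (pvIter p v t).toNat < n.toNat := by omega
    have hcast : ((pvIter p v t).toNat : Int) = pvIter p v t := by omega
    have := hcl (pvIter p v t).toNat hk ih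
    rw [hcast] at this
    have hstep : pvIter p v (t+1) = pvAt p (pvIter p v t) := by
      rw [pvIter, Function.iterate_succ_apply']; rfl
    rw [hstep]
    exact this

def pvMarked (p : List Int) (v : Int) (len : Nat) (k : Int) : Bool :=
  (List.range len).any (fun t => pvIter p v t == k)

theorem pv_marked_iff (p : List Int) (v : Int) (len : Nat) (k : Int) :
    pvMarked p v len k = true ↔ ∃ t, t < len ∧ pvIter p v t = k := by
  simp [pvMarked, List.any_eq_true, List.mem_range]

theorem pv_bool_ext (a b : Bool) (h : a = true ↔ b = true) : a = b := by
  cases a <;> cases b <;> simp_all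

theorem pv_walkA (p : List Int) (n : Int) (hn : 0 < n)
    (hmem : ∀ x, x ∈ p ↔ (0 ≤ x ∧ x < n)) (hlen : p.length = n.toNat) (hnd : p.Nodup)
    (v : Int) (hv0 : 0 ≤ v) (hvn : v < n)
    (T : Nat) (hT1 : 0 < T) (hTv : pvIter p v T = v)
    (hTmin : ∀ t, 0 < t → t < T → pvIter p v t ≠ v)
    (vis0 : List Bool)
    (hfresh : ∀ t, vis0.getD (pvIter p v t).toNat true = false) :
    ∀ (d len f : Nat) (vis : List Bool), len + d = T → 1 ≤ len → d + 1 ≤ f →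
      vis.length = n.toNat →
      (∀ k : Nat, k < n.toNat → vis.getD k true
        = (vis0.getD k true || pvMarked p v len (k : Int))) →
      ∃ vis', pvWalkA p f vis (pvIter p v len) (len : Int) = (vis', (T : Int)) ∧
        vis'.length = n.toNat ∧
        (∀ k : Nat, k < n.toNat → vis'.getD k true
          = (vis0.getD k true || pvMarked p v T (k : Int))) := by
  intro d
  induction d with
  | zero =>
    intro len f vis hdT h1len hf hvl hchar
    have hlT : len = T := by omega
    subst hlT
    rcases f with _ | f
    · omega
    have hi := pv_iter_mem p n hn hmem hlen v hv0 hvn len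
    have hc : ((pvIter p v len).toNat : Int) = pvIter p v len := by omega
    have htest : (PySem.List.pyGet? vis (pvIter p v len)).getD true = true := by
      rw [pv_test vis _ hi.1 (by omega)]
      rw [hchar (pvIter p v len).toNat (by omega)]
      have hex : (∃ t, t < len ∧ pvIter p v t = ((pvIter p v len).toNat : Int)) := by
        refine ⟨0, hT1, ?_⟩
        rw [hc, hTv]; rfl
      rw [(pv_marked_iff p v len _).2 hex, Bool.or_true]
    refine ⟨vis, ?_, hvl, fun k hk => hchar k hk⟩
    show pvWalkA p (f+1) vis (pvIter p v len) (len : Int) = (vis, (len : Int))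
    rw [pvWalkA, if_pos htest]
  | succ d ih =>
    intro len f vis hdT h1len hf hvl hchar
    rcases f with _ | f
    · omega
    have hi := pv_iter_mem p n hn hmem hlen v hv0 hvn len
    have hlenT : len < T := by omega
    have hc : ((pvIter p v len).toNat : Int) = pvIter p v len := by omega
    have htest : (PySem.List.pyGet? vis (pvIter p v len)).getD true = false := by
      rw [pv_test vis _ hi.1 (by omega)]
      rw [hchar (pvIter p v len).toNat (by omega)]
      have h0 : vis0.getD (pvIter p v len).toNat true = false := hfresh len
      have h2 : pvMarked p v len ((pvIter p v len).toNat : Int) = false := by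
        rw [Bool.eq_false_iff]
        intro hmk
        obtain ⟨t, htl, hteq⟩ := (pv_marked_iff p v len _).1 hmk
        rw [hc] at hteq
        have := pv_prefix p n hn hmem hlen hnd v hv0 hvn T hT1 hTv hTmin t len htl
          (by omega) hteq.symm
        omega
      rw [h0, h2, Bool.or_false]
    have hstep : pvAt p (pvIter p v len) = pvIter p v (len+1) := by
      simp only [pvIter]; rw [Function.iterate_succ_apply']
    have hcast : ((len : Int) + 1) = ((len + 1 : Nat) : Int) := by push_cast; ring
    have hsetlen : (vis.set (pvIter p v len).toNat true).length = n.toNat := by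
      rw [List.length_set]; exact hvl
    have hchar' : ∀ k : Nat, k < n.toNat →
        (vis.set (pvIter p v len).toNat true).getD k true
          = (vis0.getD k true || pvMarked p v (len + 1) (k : Int)) := by
      intro k hk
      have hklen : k < vis.length := by omega
      have hcurlt : (pvIter p v len).toNat < vis.length := by omega
      by_cases hkc : k = (pvIter p v len).toNat
      · subst hkc
        have hset : (vis.set (pvIter p v len).toNat true).getD (pvIter p v len).toNat true
            = true := by
          rw [List.getD_eq_getElem?_getD, List.getElem?_set_self (by omega)]
          rfl
        rw [hset]
        have hex : ∃ t, t < len + 1 ∧ pvIter p v t = (((pvIter p v len).toNat : Int)) :=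
          ⟨len, by omega, by omega⟩
        rw [(pv_marked_iff p v (len+1) _).2 hex, Bool.or_true]
      · have hset : (vis.set (pvIter p v len).toNat true).getD k true = vis.getD k true := by
          rw [List.getD_eq_getElem?_getD, List.getElem?_set_ne (by omega),
            ← List.getD_eq_getElem?_getD]
        rw [hset, hchar k hk]
        congr 1
        apply pv_bool_ext
        rw [pv_marked_iff, pv_marked_iff]
        constructor
        · rintro ⟨t, ht, he⟩; exact ⟨t, by omega, he⟩
        · rintro ⟨t, ht, he⟩
          refine ⟨t, ?_, he⟩
          rcases Nat.lt_or_ge t len with h | h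
          · exact h
          · exfalso
            have : t = len := by omega
            subst this
            apply hkc
            omega
    obtain ⟨vis', hw, hl', hc'⟩ := ih (len+1) f (vis.set (pvIter p v len).toNat true)
      (by omega) (by omega) (by omega) hsetlen hchar'
    refine ⟨vis', ?_, hl', hc'⟩
    show pvWalkA p (f+1) vis (pvIter p v len) (len : Int) = (vis', (T : Int))
    rw [pvWalkA, if_neg (by rw [htest]; simp), hstep, hcast]
    exact hw

theorem pv_walkB (p : List Int) (n : Int) (hn : 0 < n)
    (hmem : ∀ x, x ∈ p ↔ (0 ≤ x ∧ x < n)) (hlen : p.length = n.toNat) (hnd : p.Nodup)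
    (v : Int) (hv0 : 0 ≤ v) (hvn : v < n)
    (T : Nat) (hT1 : 0 < T) (hTv : pvIter p v T = v)
    (hTmin : ∀ t, 0 < t → t < T → pvIter p v t ≠ v) :
    ∀ (d len f : Nat), len + d = T → 1 ≤ len → d + 1 ≤ f →
      pvWalkB p v f ((List.range len).map (pvIter p v)) (pvIter p v len) (len : Int)
        = ((List.range T).map (pvIter p v), (T : Int)) := by
  intro d
  induction d with
  | zero =>
    intro len f hdT h1len hf
    have hlT : len = T := by omega
    subst hlT
    rcases f with _ | f
    · omega
    rw [pvWalkB, if_pos (by simp [hTv])]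
  | succ d ih =>
    intro len f hdT h1len hf
    rcases f with _ | f
    · omega
    have hlenT : len < T := by omega
    have hne : pvIter p v len ≠ v := hTmin len (by omega) hlenT
    rw [pvWalkB, if_neg (by simp [hne])]
    have hstep : pvAt p (pvIter p v len) = pvIter p v (len+1) := by
      simp only [pvIter]; rw [Function.iterate_succ_apply']
    have hmemapp : (List.range len).map (pvIter p v) ++ [pvIter p v len]
        = (List.range (len+1)).map (pvIter p v) := by
      rw [List.range_succ, List.map_append]; rfl
    have hcast : ((len : Int) + 1) = ((len + 1 : Nat) : Int) := by push_cast; ring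
    rw [hstep, hmemapp, hcast]
    exact ih (len+1) f (by omega) (by omega) (by omega)

theorem pv_walkB_sub (p : List Int) (v : Int) :
    ∀ (f : Nat) (mem : List Int) (cur len : Int) (x : Int), x ∈ mem →
      x ∈ (pvWalkB p v f mem cur len).1 := by
  intro f
  induction f with
  | zero => intro mem cur len x hx; exact hx
  | succ f ih =>
    intro mem cur len x hx
    rw [pvWalkB]
    by_cases h : cur == v
    · rw [if_pos h]; exact hx
    · rw [if_neg h]
      exact ih _ _ _ x (List.mem_append_left _ hx)

theorem pv_cycB_fuel (q : List Int) (nf : Nat) :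
    ∀ (g1 : Nat) (rem : List Int) (g2 : Nat), rem.length ≤ g1 → rem.length ≤ g2 →
      pvCycB q nf g1 rem = pvCycB q nf g2 rem := by
  intro g1
  induction g1 with
  | zero =>
    intro rem g2 h1 h2
    have : rem = [] := List.eq_nil_of_length_eq_zero (by omega)
    subst this
    cases g2 <;> rfl
  | succ a ih =>
    intro rem g2 h1 h2
    rcases rem with _ | ⟨v, rest⟩
    · cases g2 <;> rfl
    rcases g2 with _ | b
    · simp at h2
    rw [pvCycB, pvCycB]
    have hv : v ∈ (pvWalkB q v nf [v] (pvAt q v) 1).1 :=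
      pv_walkB_sub q v nf [v] (pvAt q v) 1 v (List.mem_singleton_self v)
    have hcont : ((pvWalkB q v nf [v] (pvAt q v) 1).1.contains v) = true := by
      simpa using hv
    by_cases hpar : ((pvWalkB q v nf [v] (pvAt q v) 1).2 % 2 == 0) = true
    · rw [if_pos hpar, if_pos hpar]
    · rw [if_neg hpar, if_neg hpar]
      congr 1
      have hfil : (v :: rest).filter
          (fun u => !(pvWalkB q v nf [v] (pvAt q v) 1).1.contains u)
          = rest.filter (fun u => !(pvWalkB q v nf [v] (pvAt q v) 1).1.contains u) := by
        rw [List.filter_cons, hcont]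
        simp
      rw [hfil]
      exact ih _ b (le_trans (List.length_filter_le _ _) (by simpa using h1))
        (le_trans (List.length_filter_le _ _) (by simpa using h2))

theorem pv_remhead (n : Int) (vis : List Bool) (s : Int) (hs0 : 0 ≤ s) (hsn : s < n)
    (hvl : vis.length = n.toNat)
    (hlow : ∀ k : Nat, k < n.toNat → (k : Int) < s → vis.getD k true = true)
    (hsv : vis.getD s.toNat true = false) :
    pvRemOf n vis
      = s :: (PySem.List.pyRange (s+1) n 1).filter (fun j => !(vis.getD j.toNat true)) := by
  rw [pvRemOf, PySem.List.pyRange_one_append 0 s n hs0 (le_of_lt hsn), List.filter_append]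
  have hleft : (PySem.List.pyRange 0 s 1).filter (fun j => !(vis.getD j.toNat true)) = [] := by
    apply List.filter_eq_nil_iff.2
    intro j hj
    rcases PySem.List.mem_pyRange_one.1 hj with ⟨hj0, hjs⟩
    have h1 : vis.getD j.toNat true = true := hlow j.toNat (by omega) (by omega)
    rw [h1]
    simp
  rw [hleft, List.nil_append, PySem.List.pyRange_one_cons hsn, List.filter_cons]
  rw [hsv]
  simp

theorem pv_cycloop (p : List Int) (n : Int) (hn : 0 < n)
    (hmem : ∀ x, x ∈ p ↔ (0 ≤ x ∧ x < n)) (hlen : p.length = n.toNat) (hnd : p.Nodup) :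
    ∀ (d : Nat) (s : Int) (vis : List Bool) (num : Nat),
      0 ≤ s → s + (d : Int) = n →
      vis.length = n.toNat →
      (∀ k : Nat, k < n.toNat → (k : Int) < s → vis.getD k true = true) →
      (∀ k : Nat, k < n.toNat → vis.getD k true = false →
        vis.getD (pvAt p (k : Int)).toNat true = false) →
      pvCycA p (n.toNat + 1) (PySem.List.pyRange s n 1) vis num
        = 2 ^ num * pvCycB p (n.toNat + 1) (pvRemOf n vis).length (pvRemOf n vis) := by
  intro d
  induction d with
  | zero =>
    intro s vis num hs0 hsd hvl hlow _
    have hsn : s = n := by omega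
    subst hsn
    rw [PySem.List.pyRange_one_eq_nil le_rfl]
    have hrem : pvRemOf s vis = [] := by
      apply List.filter_eq_nil_iff.2
      intro j hj
      rcases PySem.List.mem_pyRange_one.1 hj with ⟨hj0, hjs⟩
      have h1 : vis.getD j.toNat true = true := hlow j.toNat (by omega) (by omega)
      rw [h1]
      simp
    rw [hrem, List.length_nil]
    rw [show pvCycB p (s.toNat + 1) 0 [] = 1 from rfl, mul_one]
    rfl
  | succ d ih =>
    intro s vis num hs0 hsd hvl hlow hcl
    have hsn : s < n := by omega
    have hsN : s.toNat < n.toNat := by omega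
    have htestA : (PySem.List.pyGet? vis s).getD true = vis.getD s.toNat true :=
      pv_test vis s hs0 (by omega)
    rw [PySem.List.pyRange_one_cons hsn, pvCycA]
    by_cases hvs : vis.getD s.toNat true = true
    · rw [htestA, hvs, if_pos rfl]
      have hlow' : ∀ k : Nat, k < n.toNat → (k : Int) < s + 1 → vis.getD k true = true := by
        intro k hk hks
        by_cases hke : (k : Int) = s
        · have : k = s.toNat := by omega
          rw [this]; exact hvs
        · exact hlow k hk (by omega)
      exact ih (s+1) vis num (by omega) (by push_cast; omega) hvl hlow' hcl
    · have hvs' : vis.getD s.toNat true = false := by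
        revert hvs; cases vis.getD s.toNat true <;> simp
      rw [htestA, hvs']
      rw [if_neg (by simp)]
      obtain ⟨T, hT1, hTN, hTv, hTmin⟩ := pv_period p n hn hmem hlen hnd s hs0 hsn
      have hfresh := pv_fresh p n hn hmem hlen s hs0 hsn vis hvl hcl hvs'
      have hit1 : pvIter p s 1 = pvAt p s := by simp [pvIter]
      -- one unfolded step of A's walk
      have hwstep : pvWalkA p (n.toNat + 1) vis s 0
          = pvWalkA p n.toNat (vis.set s.toNat true) (pvIter p s 1) ((1 : Nat) : Int) := by
        rw [pvWalkA, htestA, hvs']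
        rw [if_neg (by simp)]
        rw [hit1]
        norm_num
      have hchar1 : ∀ k : Nat, k < n.toNat → (vis.set s.toNat true).getD k true
          = (vis.getD k true || pvMarked p s 1 (k : Int)) := by
        intro k hk
        by_cases hkc : k = s.toNat
        · subst hkc
          have hset : (vis.set s.toNat true).getD s.toNat true = true := by
            rw [List.getD_eq_getElem?_getD, List.getElem?_set_self (by omega)]
            rfl
          rw [hset]
          have hex : ∃ t, t < 1 ∧ pvIter p s t = ((s.toNat : Int)) :=
            ⟨0, by omega, by show s = _; omega⟩
          rw [(pv_marked_iff p s 1 _).2 hex, Bool.or_true]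
        · have hset : (vis.set s.toNat true).getD k true = vis.getD k true := by
            rw [List.getD_eq_getElem?_getD, List.getElem?_set_ne (by omega),
              ← List.getD_eq_getElem?_getD]
          have hnex : pvMarked p s 1 (k : Int) = false := by
            rw [Bool.eq_false_iff]
            intro hmk
            obtain ⟨t, ht, he⟩ := (pv_marked_iff p s 1 _).1 hmk
            have ht0 : t = 0 := by omega
            subst ht0
            have : s = (k : Int) := he
            omega
          rw [hset, hnex, Bool.or_false]
      obtain ⟨vis', hwA, hvl', hchar'⟩ := pv_walkA p n hn hmem hlen hnd s hs0 hsn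
        T hT1 hTv hTmin vis hfresh (T - 1) 1 n.toNat (vis.set s.toNat true)
        (by omega) le_rfl (by omega) (by rw [List.length_set]; exact hvl) hchar1
      rw [hwstep, hwA]
      -- B side
      have hrh := pv_remhead n vis s hs0 hsn hvl hlow hvs'
      have hwB := pv_walkB p n hn hmem hlen hnd s hs0 hsn T hT1 hTv hTmin
        (T - 1) 1 (n.toNat + 1) (by omega) le_rfl (by omega)
      have hr1 : (List.range 1).map (pvIter p s) = [s] := by
        simp [pvIter]
      rw [hr1] at hwB
      rw [hit1] at hwB
      rw [hrh, List.length_cons, pvCycB]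
      have hcast1 : ((1 : Nat) : Int) = (1 : Int) := by norm_num
      rw [hcast1] at hwB
      rw [hwB]
      by_cases hpar : (((T : Nat) : Int) % 2 == 0) = true
      · rw [if_pos hpar, if_pos hpar, mul_zero]
      · rw [if_neg hpar, if_neg hpar]
        have hcontains : ∀ u : Int, (((List.range T).map (pvIter p s)).contains u)
            = pvMarked p s T u := by
          intro u
          apply pv_bool_ext
          rw [pv_marked_iff]
          simp [List.mem_map, List.mem_range]
        have hlow' : ∀ k : Nat, k < n.toNat → (k : Int) < s + 1 →
            vis'.getD k true = true := by
          intro k hk hks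
          rw [hchar' k hk]
          by_cases hke : (k : Int) = s
          · have hex : ∃ t, t < T ∧ pvIter p s t = (k : Int) :=
              ⟨0, hT1, by show s = _; omega⟩
            rw [(pv_marked_iff p s T _).2 hex, Bool.or_true]
          · have hlt : (k : Int) < s := by omega
            rw [hlow k hk hlt, Bool.true_or]
        have hcl' : ∀ k : Nat, k < n.toNat → vis'.getD k true = false →
            vis'.getD (pvAt p (k : Int)).toNat true = false := by
          intro k hk hkf
          rw [hchar' k hk] at hkf
          have hor := Bool.or_eq_false_iff.1 hkf
          have hk0 : (0 : Int) ≤ (k : Int) := by omega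
          have hkn : ((k : Int)) < n := by omega
          have hpk := pv_at_mem p n hn hmem hlen (k : Int) hk0 hkn
          have hk' : (pvAt p (k : Int)).toNat < n.toNat := by omega
          rw [hchar' _ hk']
          have h1 : vis.getD (pvAt p (k : Int)).toNat true = false := hcl k hk hor.1
          have hnomark : ¬ ∃ t, t < T ∧ pvIter p s t = (k : Int) := by
            intro hex
            have hmk := (pv_marked_iff p s T ((k : Nat) : Int)).2 hex
            rw [hor.2] at hmk
            cases hmk
          have h2 : pvMarked p s T (((pvAt p (k : Int)).toNat : Int)) = false := by
            rw [Bool.eq_false_iff]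
            intro hmm
            obtain ⟨t, htT, hte⟩ := (pv_marked_iff p s T _).1 hmm
            have hcast : (((pvAt p (k : Int)).toNat : Int)) = pvAt p (k : Int) := by omega
            rw [hcast] at hte
            rcases t with _ | t'
            · have hs_eq : s = pvAt p (k : Int) := hte
              have hTstep : pvAt p (pvIter p s (T - 1)) = pvIter p s T := by
                have h := Function.iterate_succ_apply' (pvAt p) (T - 1) s
                simp only [pvIter]
                rw [← h, show (T - 1).succ = T by omega]
              have hiT := pv_iter_mem p n hn hmem hlen s hs0 hsn (T - 1)
              have heq2 : pvAt p (pvIter p s (T - 1)) = pvAt p (k : Int) := by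
                rw [hTstep, hTv, hs_eq]
              have hkk := pv_at_inj p n hn hlen hnd _ _ hiT.1 hiT.2 hk0 hkn heq2
              exact hnomark ⟨T - 1, by omega, hkk⟩
            · have hstep2 : pvIter p s (t' + 1) = pvAt p (pvIter p s t') := by
                simp only [pvIter]
                rw [Function.iterate_succ_apply']
              rw [hstep2] at hte
              have hit := pv_iter_mem p n hn hmem hlen s hs0 hsn t'
              have hkk := pv_at_inj p n hn hlen hnd _ _ hit.1 hit.2 hk0 hkn hte
              exact hnomark ⟨t', by omega, hkk⟩
          rw [h1, h2, Bool.or_false]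
        have hIH := ih (s + 1) vis' (num + 1) (by omega) (by push_cast; omega)
          hvl' hlow' hcl'
        rw [hIH]
        have hOs : (((List.range T).map (pvIter p s)).contains s) = true := by
          rw [hcontains s]
          exact (pv_marked_iff p s T s).2 ⟨0, hT1, rfl⟩
        have hremeq : (s :: (PySem.List.pyRange (s+1) n 1).filter
              (fun j => !(vis.getD j.toNat true))).filter
                (fun u => !(((List.range T).map (pvIter p s)).contains u))
            = pvRemOf n vis' := by
          rw [← hrh, pvRemOf, pvRemOf, List.filter_filter]
          apply List.filter_congr
          intro j hj
          rcases PySem.List.mem_pyRange_one.1 hj with ⟨hj0, hjn⟩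
          have hjN : j.toNat < n.toNat := by omega
          rw [hchar' j.toNat hjN, hcontains j]
          have hcast : ((j.toNat : Int)) = j := by omega
          rw [hcast, Bool.not_or, Bool.and_comm]
        have hlenle : (pvRemOf n vis').length
            ≤ ((PySem.List.pyRange (s+1) n 1).filter
                (fun j => !(vis.getD j.toNat true))).length := by
          rw [← hremeq, List.filter_cons, hOs]
          simp only [Bool.not_true, Bool.false_eq_true, if_false]
          exact List.length_filter_le _ _
        rw [hremeq]
        rw [pv_cycB_fuel p (n.toNat + 1) _ (pvRemOf n vis') ((pvRemOf n vis').length)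
          hlenle le_rfl]
        rw [pow_succ]
        ring

-- ---- permutation-value correspondence (the core) ----
theorem pv_core (p : List Int) (n : Int) (hn : 0 < n)
    (hmem : ∀ x, x ∈ p ↔ (0 ≤ x ∧ x < n))
    (hlen : p.length = n.toNat) (hnd : p.Nodup) :
    pvCycA p (n.toNat + 1) (PySem.List.pyRange 0 n 1) (List.replicate n.toNat false) 0
      = pvLeaf p n := by
  have hrepl : ∀ k : Nat, k < n.toNat → (List.replicate n.toNat false).getD k true = false := by
    intro k hk
    rw [List.getD_eq_getElem?_getD, List.getElem?_eq_getElem (by simpa using hk)]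
    simp
  have hloop := pv_cycloop p n hn hmem hlen hnd n.toNat 0 (List.replicate n.toNat false) 0
    le_rfl (by push_cast; omega) (by simp)
    (fun k hk hlt => absurd hlt (by omega))
    (by
      intro k hk _
      have := pv_at_mem p n hn hmem hlen (k : Int) (by omega) (by omega)
      exact hrepl _ (by omega))
  rw [hloop]
  have hrem : pvRemOf n (List.replicate n.toNat false) = PySem.List.pyRange 0 n 1 := by
    apply List.filter_eq_self.2
    intro j hj
    rcases PySem.List.mem_pyRange_one.1 hj with ⟨hj0, hjn⟩
    rw [hrepl j.toNat (by omega)]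
    rfl
  rw [hrem, PySem.List.length_pyRange_one,
    show ((n : Int) - 0).toNat = n.toNat by omega, pvLeaf, pow_zero, one_mul]

-- ---- assembly ----
theorem pv_score_eq (adj : List (List Bool)) (n : Int) (hn : 0 < n) (s : List Int)
    (hs : s ∈ PySem.List.permutations (PySem.List.pyRange 0 n 1)
      (PySem.List.pyRange 0 n 1).length) :
    pvScoreA adj n s = if pvValidFrom adj 0 s then pvLeaf ([] ++ s) n else 0 := by
  have hperm := PySem.List.perm_of_mem_permutations hs
  have hlenR : (PySem.List.pyRange 0 n 1).length = n.toNat := by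
    rw [PySem.List.length_pyRange_one]; omega
  have hlen : s.length = n.toNat := by rw [hperm.length_eq, hlenR]
  have hmem : ∀ x, x ∈ s ↔ (0 ≤ x ∧ x < n) := by
    intro x
    rw [hperm.mem_iff, PySem.List.mem_pyRange_one]
  have hnd : s.Nodup := hperm.nodup_iff.2 (PySem.List.nodup_pyRange_one 0 n)
  have hvalid : pvValidFrom adj 0 s
      = (PySem.List.pyRange 0 n 1).all (fun i => pvAdjAt adj i (pvAt s i)) := by
    rw [pv_validFrom_eq adj s 0 le_rfl]
    have he : (0 : Int) + (s.length : Int) = n := by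
      rw [hlen]; omega
    rw [he]
    apply pv_all_congr
    intro k _
    rw [sub_zero]
  rw [List.nil_append, pvScoreA, ← hvalid]
  by_cases h : pvValidFrom adj 0 s
  · rw [if_pos h, if_pos h]
    exact pv_core s n hn hmem hlen hnd
  · rw [if_neg h, if_neg h]

theorem pv_main (adj : List (List Bool)) (n : Int) :
    odd_cycle_cover_weighted adj n = odd_cycle_cover_weighted_alt adj n := by
  rcases lt_trichotomy n 0 with hneg | rfl | hpos
  · have hr : PySem.List.pyRange 0 n 1 = [] := PySem.List.pyRange_one_eq_nil (le_of_lt hneg)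
    unfold odd_cycle_cover_weighted odd_cycle_cover_weighted_alt
    rw [if_neg (by omega), if_pos (le_of_lt hneg), hr]
    rw [show ([] : List Int).length = 0 from rfl, pv_perm_zero]
    simp [pvScoreA, hr, pvCycA]
  · rfl
  · unfold odd_cycle_cover_weighted odd_cycle_cover_weighted_alt
    rw [if_neg (by omega), if_neg (by omega)]
    have hlenR : (PySem.List.pyRange 0 n 1).length = n.toNat := by
      rw [PySem.List.length_pyRange_one]; omega
    have hBT := pv_BT adj n n.toNat [] (PySem.List.pyRange 0 n 1)
      (PySem.List.nodup_pyRange_one 0 n) (by simp) hlenR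
    simp only [List.length_nil, Nat.cast_zero] at hBT
    rw [hBT, PySem.List.foldl_add, zero_add, hlenR]
    congr 1
    apply List.map_congr_left
    intro s hs
    exact pv_score_eq adj n hpos s (by rw [hlenR]; exact hs)

-- ===== VERDICT (by name: the statement is the Claim_ definition above) =====
theorem odd_cycle_cover_weighted_spec : Claim_equal_odd_cycle_cover_weighted := by
  intro adj n _ _
  unfold Spec_odd_cycle_cover_weighted
  exact pv_main adj n
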